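-- pv_equiv track=rewrite | github.com/x5px/matura | Arkusze/2018/Zadania/Zadanie 4/4_2.py | rozne_litery
-- ===== SOURCE A (Python) =====
-- def rozne_litery(tab):
--     max_ct = 0
--     max_ct_str = ''
--     for i in tab:
--         ct = 0
--         txt = []
--         for j in i:
--             if j not in txt:
--                 txt.append(j)
--         if len(txt) > max_ct:
--             max_ct = len(txt)
--             max_ct_str = i
--     return max_ct_str + ' ' +  str(max_ct)
-- ===== SOURCE B (Python) =====
-- def rozne_litery(tab):
--     ranked = sorted(tab, key=lambda s: -len(set(s)))
--     best = ranked[0] if ranked else ''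
--     return best + ' ' + str(len(set(best)))
-- ===== Notes on version B (the rewrite author's own statement) =====
-- stated objective: alternative
-- what changed: Replaces A's fused max-tracking scan with hand-rolled char dedup by stable-sorting the list on descending distinct-letter count (set-based) and taking the head; stability makes the head the first word with the maximal count.
import Mathlib
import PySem

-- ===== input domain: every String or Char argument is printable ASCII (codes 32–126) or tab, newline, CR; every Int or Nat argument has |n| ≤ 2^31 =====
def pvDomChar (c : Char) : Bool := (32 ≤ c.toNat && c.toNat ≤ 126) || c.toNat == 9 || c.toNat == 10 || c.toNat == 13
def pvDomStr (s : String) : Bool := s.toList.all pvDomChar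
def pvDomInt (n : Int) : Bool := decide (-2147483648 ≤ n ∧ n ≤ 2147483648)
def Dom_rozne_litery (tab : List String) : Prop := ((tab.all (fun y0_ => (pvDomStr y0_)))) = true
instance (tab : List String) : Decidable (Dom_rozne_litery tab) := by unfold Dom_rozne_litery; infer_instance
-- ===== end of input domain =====

-- B replaces A's fused max-tracking scan (with hand-rolled char dedup) by a
-- stable sort on descending distinct-letter count and taking the head.


-- ===== PORT A =====
def rozne_litery (tab : List String) : String :=
  let st := tab.foldl (fun (acc : Int × String) i =>
    let txt := i.toList.foldl
      (fun (txt : List Char) j => if j ∈ txt then txt else txt ++ [j]) []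
    if (txt.length : Int) > acc.1 then ((txt.length : Int), i) else acc) (0, "")
  st.2 ++ " " ++ PySem.Int.toStr st.1

-- ===== PORT B =====
def rozne_litery_alt (tab : List String) : String :=
  let ranked := PySem.List.sorted tab (fun s => -((PySem.Set.ofList s.toList).length : Int)) false
  let best := match ranked with
    | [] => ""
    | b :: _ => b
  best ++ " " ++ PySem.Int.toStr ((PySem.Set.ofList best.toList).length : Int)

-- ===== PRECONDITION & SPEC =====
def Spec_rozne_litery (tab : List String) (out : String) : Prop := out = rozne_litery_alt tab
instance (tab : List String) (out : String) : Decidable (Spec_rozne_litery tab out) := by unfold Spec_rozne_litery; infer_instance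

-- ===== CLAIM (what is proved, stated in full; the proofs are below) =====
def Claim_equal_rozne_litery : Prop := ∀ (tab : List String), Dom_rozne_litery tab → Spec_rozne_litery tab (rozne_litery tab)

-- ===== LEMMAS AND PROOFS =====

/-- number of distinct characters of a string -/
def pvCnt (s : String) : Int := ((PySem.Set.ofList s.toList).length : Int)

/-- running first-maximum (by distinct-letter count; earliest wins ties) -/
def pvFirstMax (b : String) : List String → String
  | [] => b
  | x :: r => pvFirstMax (if pvCnt x > pvCnt b then x else b) r

theorem pvCnt_nonneg (s : String) : 0 ≤ pvCnt s := by
  simp [pvCnt]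

theorem pvCnt_eq_zero {s : String} (h : pvCnt s = 0) : s = "" := by
  apply String.toList_eq_nil_iff.mp
  have hlen : (PySem.Set.ofList s.toList).length = 0 := by
    simpa [pvCnt] using h
  rcases hnil : s.toList with _ | ⟨c, cs⟩
  · rfl
  · exfalso
    have hc : c ∈ PySem.Set.ofList s.toList := by
      rw [PySem.Set.mem_ofList, hnil]; exact List.mem_cons_self
    rw [List.length_eq_zero_iff.mp hlen] at hc
    exact absurd hc (List.not_mem_nil)

/-- A's inner dedup loop builds exactly set(s) -/
theorem pvInner_eq_ofList (l : List Char) :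
    l.foldl (fun (txt : List Char) j => if j ∈ txt then txt else txt ++ [j]) []
      = PySem.Set.ofList l := by
  rw [PySem.Set.ofList_eq_foldl]
  congr 1
  funext txt j
  simp [PySem.Set.add, PySem.Set.contains]

/-- A's outer loop from a state (pvCnt b, b) tracks pvFirstMax -/
theorem pvFoldA (r : List String) : ∀ (b : String),
    r.foldl (fun (acc : Int × String) i =>
        if pvCnt i > acc.1 then (pvCnt i, i) else acc) (pvCnt b, b)
      = (pvCnt (pvFirstMax b r), pvFirstMax b r) := by
  induction r with
  | nil => intro b; simp [pvFirstMax]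
  | cons x r ih =>
    intro b
    simp only [List.foldl_cons, pvFirstMax]
    by_cases h : pvCnt x > pvCnt b
    · rw [if_pos h, if_pos h]; exact ih x
    · rw [if_neg h, if_neg h]; exact ih b

/-- the head of the insertBy-foldl over a nonempty accumulator is the running first-minimum of the key -/
theorem pvFoldIns (r : List String) : ∀ (h : String) (t : List String),
    ∃ t', r.foldl (fun acc x =>
        PySem.List.insertBy (fun a b => decide ((fun s => -(pvCnt s)) a < (fun s => -(pvCnt s)) b)) x acc)
        (h :: t)
      = pvFirstMax h r :: t' := by
  induction r with
  | nil => intro h t; exact ⟨t, by simp [pvFirstMax]⟩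
  | cons x r ih =>
    intro h t
    simp only [List.foldl_cons, PySem.List.insertBy, pvFirstMax]
    by_cases hx : pvCnt x > pvCnt h
    · rw [if_pos hx, if_pos (by simp; omega)]
      exact ih x (h :: t)
    · rw [if_neg hx, if_neg (by simp; omega)]
      exact ih h _

-- ===== VERDICT (by name: the statement is the Claim_ definition above) =====
theorem rozne_litery_spec : Claim_equal_rozne_litery := by
  intro tab _
  unfold Spec_rozne_litery rozne_litery rozne_litery_alt
  have hstep : (fun (acc : Int × String) i =>
      let txt := i.toList.foldl
        (fun (txt : List Char) j => if j ∈ txt then txt else txt ++ [j]) []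
      if (txt.length : Int) > acc.1 then ((txt.length : Int), i) else acc)
      = (fun (acc : Int × String) i => if pvCnt i > acc.1 then (pvCnt i, i) else acc) := by
    funext acc i
    simp only [pvInner_eq_ofList, pvCnt]
  simp only [hstep, PySem.List.sorted_eq_foldl_insertBy]
  cases tab with
  | nil => simp
  | cons s r =>
    -- A side: the first step moves the state from (0,"") to (pvCnt s, s)
    have hfirst : ((s :: r).foldl (fun (acc : Int × String) i =>
        if pvCnt i > acc.1 then (pvCnt i, i) else acc) (0, ""))
        = (pvCnt (pvFirstMax s r), pvFirstMax s r) := by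
      rw [List.foldl_cons]
      by_cases hs : pvCnt s > 0
      · rw [if_pos hs]; exact pvFoldA r s
      · have h0 : pvCnt s = 0 := le_antisymm (by omega) (pvCnt_nonneg s)
        have hse : s = "" := pvCnt_eq_zero h0
        rw [if_neg hs]
        have : ((0 : Int), "") = (pvCnt s, s) := by rw [h0, hse]
        rw [this]; exact pvFoldA r s
    -- B side: head of the insertion-sort fold is pvFirstMax s r
    have hB : ∃ t', ((s :: r).foldl (fun acc x =>
        PySem.List.insertBy (fun a b =>
          decide ((fun s => -((PySem.Set.ofList s.toList).length : Int)) a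
                < (fun s => -((PySem.Set.ofList s.toList).length : Int)) b)) x acc) [])
        = pvFirstMax s r :: t' := by
      rw [List.foldl_cons]
      have : PySem.List.insertBy (fun a b =>
          decide ((fun s => -((PySem.Set.ofList s.toList).length : Int)) a
                < (fun s => -((PySem.Set.ofList s.toList).length : Int)) b)) s ([] : List String)
          = [s] := rfl
      rw [this]
      exact pvFoldIns r s []
    obtain ⟨t', ht'⟩ := hB
    rw [hfirst]
    simp only [ht']
    rfl
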